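-- pv_equiv track=rewrite | github.com/thecontextlab/swebench-pro-runner | scripts/eval-orchestration/_utils.py | get_repo_from_folder
-- ===== SOURCE A (Python) =====
-- REPOS = [
--     "ansible", "element-web", "flipt", "navidrome", "NodeBB",
--     "openlibrary", "qutebrowser", "teleport", "tutanota", "vuls", "webclients",
-- ]
--
-- _MULTI_WORD_REPOS = [r for r in REPOS if "-" in r]  # ["element-web"]
--
-- def get_repo_from_folder(folder):
--     """Extract repo name from folder like 'codex-gpt52-{repo}-{hash}' or 'claude-opus-4-6-{repo}-{hash}'.
--
--     Strips known prefixes, then matches against the known repo list.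
--     Multi-word repos (element-web) are checked first to avoid splitting errors.
--     """
--     name = folder
--     # Strip known model prefixes
--     for prefix in ("codex-gpt52-", "claude-opus-4-6-", "claude-sonnet-4-5-",
--                    "claude-sonnet-4-", "claude-haiku-4-5-"):
--         if name.startswith(prefix):
--             name = name[len(prefix):]
--             break
--
--     # Match multi-word repos first, then single-word
--     for r in _MULTI_WORD_REPOS:
--         if name.startswith(r + "-"):
--             return r
--     for r in REPOS:
--         if name.startswith(r + "-"):
--             return r
--     return name.split("-")[0]
-- ===== SOURCE B (Python) =====
-- REPOS = [
--     "ansible", "element-web", "flipt", "navidrome", "NodeBB",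
--     "openlibrary", "qutebrowser", "teleport", "tutanota", "vuls", "webclients",
-- ]
--
-- _REPO_SET = frozenset(REPOS)
--
-- def get_repo_from_folder(folder):
--     """Extract repo name from folder like 'codex-gpt52-{repo}-{hash}'.
--
--     Strips known model prefixes, then tries the longest dash-joined token
--     prefix of the remainder that names a known repo.
--     """
--     name = folder
--     for prefix in ("codex-gpt52-", "claude-opus-4-6-", "claude-sonnet-4-5-",
--                    "claude-sonnet-4-", "claude-haiku-4-5-"):
--         if name.startswith(prefix):
--             name = name[len(prefix):]
--             break
--
--     tokens = name.split("-")
--     for i in reversed(range(1, len(tokens))):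
--         cand = "-".join(tokens[:i])
--         if cand in _REPO_SET:
--             return cand
--     return tokens[0]
-- ===== Notes on version B (the rewrite author's own statement) =====
-- stated objective: alternative
-- what changed: Instead of scanning the repo list twice with startswith (multi-word repos first, then all repos), B splits the stripped name into dash tokens once and tries the dash-joined token prefixes longest-first against a frozenset of known repos.
import Mathlib
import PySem

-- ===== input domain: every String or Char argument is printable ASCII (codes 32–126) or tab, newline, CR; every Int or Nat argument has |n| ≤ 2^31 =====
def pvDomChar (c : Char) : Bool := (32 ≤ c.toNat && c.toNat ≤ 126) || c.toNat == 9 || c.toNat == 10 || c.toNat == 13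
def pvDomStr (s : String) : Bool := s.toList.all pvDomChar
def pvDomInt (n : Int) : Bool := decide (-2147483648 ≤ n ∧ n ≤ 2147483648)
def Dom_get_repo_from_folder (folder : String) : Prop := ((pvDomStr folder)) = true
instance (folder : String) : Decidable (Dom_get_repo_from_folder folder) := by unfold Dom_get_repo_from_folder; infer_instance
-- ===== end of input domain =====

-- B replaces A's two startswith scans over the repo list by tokenizing the stripped name on '-'
-- and trying the dash-joined token prefixes longest-first against a set of known repos (alternative decomposition, same cost).

-- shared module constants (the same literals both Python files carry)
def pvRepos : List (List Char) :=
  ["ansible".toList, "element-web".toList, "flipt".toList, "navidrome".toList, "NodeBB".toList,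
   "openlibrary".toList, "qutebrowser".toList, "teleport".toList, "tutanota".toList,
   "vuls".toList, "webclients".toList]

def pvModelPrefixes : List (List Char) :=
  ["codex-gpt52-".toList, "claude-opus-4-6-".toList, "claude-sonnet-4-5-".toList,
   "claude-sonnet-4-".toList, "claude-haiku-4-5-".toList]

-- ===== PORT A =====
-- _MULTI_WORD_REPOS = [r for r in REPOS if "-" in r]
def pvMultiWordRepos : List (List Char) := pvRepos.filter (fun r => PySem.Chars.isIn ['-'] r)

-- the prefix-stripping loop (breaks after the first matching prefix)
def pvStripA : List (List Char) → List Char → List Char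
  | [], name => name
  | p :: ps, name =>
    if PySem.Chars.startswith name p then PySem.List.slice name (some (p.length : Int)) none
    else pvStripA ps name

-- 'for r in rs: if name.startswith(r + "-"): return r'
def pvScanA : List (List Char) → List Char → Option (List Char)
  | [], _ => none
  | r :: rs, name =>
    if PySem.Chars.startswith name (r ++ ['-']) then some r else pvScanA rs name

def pvAMatch (name : List Char) : List Char :=
  match pvScanA pvMultiWordRepos name with
  | some r => r
  | none =>
    match pvScanA pvRepos name with
    | some r => r
    | none => (PySem.Chars.splitOn name ['-']).headD []  -- split() is never empty, so [0] is exact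

def pvACore (folder : List Char) : List Char := pvAMatch (pvStripA pvModelPrefixes folder)

def get_repo_from_folder (folder : String) : String := String.ofList (pvACore folder.toList)

-- ===== PORT B =====
def pvRepoSet : PySem.Set (List Char) := PySem.Set.ofList pvRepos

-- the identical prefix-stripping loop of Source B
def pvStripB : List (List Char) → List Char → List Char
  | [], name => name
  | p :: ps, name =>
    if PySem.Chars.startswith name p then PySem.List.slice name (some (p.length : Int)) none
    else pvStripB ps name

-- 'for i in reversed(range(1, len(tokens))): cand = "-".join(tokens[:i]); if cand in _REPO_SET: return cand'
def pvScanB (tokens : List (List Char)) : List Int → Option (List Char)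
  | [] => none
  | i :: is =>
    let cand := PySem.Chars.join ['-'] (PySem.List.slice tokens none (some i))
    if cand ∈ pvRepoSet then some cand else pvScanB tokens is

def pvBCore (folder : List Char) : List Char :=
  let tokens := PySem.Chars.splitOn (pvStripB pvModelPrefixes folder) ['-']
  match pvScanB tokens (PySem.List.pyRange 1 (tokens.length : Int) 1).reverse with
  | some c => c
  | none => tokens.headD []  -- tokens[0]; split() is never empty, so [0] is exact

def get_repo_from_folder_alt (folder : String) : String := String.ofList (pvBCore folder.toList)

-- ===== PRECONDITION & SPEC =====
def Spec_get_repo_from_folder (folder : String) (out : String) : Prop := out = get_repo_from_folder_alt folder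
instance (folder : String) (out : String) : Decidable (Spec_get_repo_from_folder folder out) := by unfold Spec_get_repo_from_folder; infer_instance

-- ===== CLAIM (what is proved, stated in full; the proofs are below) =====
def Claim_equal_get_repo_from_folder : Prop := ∀ (folder : String), Dom_get_repo_from_folder folder → Spec_get_repo_from_folder folder (get_repo_from_folder folder)

-- ===== LEMMAS AND PROOFS =====

-- structural model of splitOn on a single dash
def pvDsplit : List Char → List (List Char)
  | [] => [[]]
  | c :: rest => if c = '-' then [] :: pvDsplit rest else (pvDsplit rest).modifyHead (c :: ·)

theorem pvDsplit_ne_nil (s : List Char) : pvDsplit s ≠ [] := by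
  induction s with
  | nil => simp [pvDsplit]
  | cons c rest ih =>
    simp only [pvDsplit]
    split
    · simp
    · cases h : pvDsplit rest with
      | nil => exact absurd h ih
      | cons q tl => simp

theorem pvDsplit_dash_free (s : List Char) : ∀ t ∈ pvDsplit s, '-' ∉ t := by
  induction s with
  | nil => simp [pvDsplit]
  | cons c rest ih =>
    simp only [pvDsplit]
    split
    · intro t ht
      rcases List.mem_cons.mp ht with h | h
      · simp [h]
      · exact ih t h
    · rename_i hc
      cases h : pvDsplit rest with
      | nil => exact absurd h (pvDsplit_ne_nil rest)
      | cons q tl =>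
        intro t ht
        rw [h] at ih
        simp only [List.modifyHead_cons] at ht
        rcases List.mem_cons.mp ht with h' | h'
        · subst h'
          intro hm
          rcases List.mem_cons.mp hm with h'' | h''
          · exact hc h''.symm
          · exact ih q (List.mem_cons_self) h''
        · exact ih t (List.mem_cons_of_mem _ h')

theorem pvJoin_cons_head (c : Char) (q : List Char) (tl : List (List Char)) :
    PySem.Chars.join ['-'] ((c :: q) :: tl) = c :: PySem.Chars.join ['-'] (q :: tl) := by
  cases tl with
  | nil => simp [PySem.Chars.join_singleton]
  | cons t tl' => simp [PySem.Chars.join_cons_cons]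

theorem pvJoin_dsplit (s : List Char) : PySem.Chars.join ['-'] (pvDsplit s) = s := by
  induction s with
  | nil => simp [pvDsplit, PySem.Chars.join_singleton]
  | cons c rest ih =>
    simp only [pvDsplit]
    cases h : pvDsplit rest with
    | nil => exact absurd h (pvDsplit_ne_nil rest)
    | cons q tl =>
      rw [h] at ih
      split
      · rename_i hc
        subst hc
        rw [PySem.Chars.join_cons_cons]
        simp [ih]
      · rw [List.modifyHead_cons, pvJoin_cons_head, ih]

theorem pvDsplit_append (cs rest : List Char) (hc : '-' ∉ cs) :
    pvDsplit (cs ++ '-' :: rest) = cs :: pvDsplit rest := by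
  induction cs with
  | nil => simp [pvDsplit]
  | cons a cs ih =>
    simp only [List.mem_cons, not_or] at hc
    simp only [List.cons_append, pvDsplit]
    rw [if_neg (fun h => hc.1 h.symm), ih hc.2]
    simp

theorem pvDsplit_nodash (cs : List Char) (hc : '-' ∉ cs) : pvDsplit cs = [cs] := by
  induction cs with
  | nil => rfl
  | cons a cs ih =>
    simp only [List.mem_cons, not_or] at hc
    simp only [pvDsplit]
    rw [if_neg (fun h => hc.1 h.symm), ih hc.2]
    simp

theorem pvDsplit_join (ts : List (List Char)) (h : ts ≠ []) (hfree : ∀ t ∈ ts, '-' ∉ t) :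
    pvDsplit (PySem.Chars.join ['-'] ts) = ts := by
  induction ts with
  | nil => exact absurd rfl h
  | cons t tl ih =>
    cases tl with
    | nil =>
      rw [PySem.Chars.join_singleton]
      exact pvDsplit_nodash t (hfree t List.mem_cons_self)
    | cons t2 tl2 =>
      rw [PySem.Chars.join_cons_cons]
      have : t ++ ['-'] ++ PySem.Chars.join ['-'] (t2 :: tl2)
          = t ++ '-' :: PySem.Chars.join ['-'] (t2 :: tl2) := by simp
      rw [this, pvDsplit_append _ _ (hfree t List.mem_cons_self),
        ih (by simp) (fun x hx => hfree x (List.mem_cons_of_mem _ hx))]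

theorem pvSplitOn_go_spec (fuel : Nat) :
    ∀ (l cur : List Char) (accl : List (List Char)), l.length < fuel →
      PySem.Chars.splitOn.go ['-'] fuel l cur accl =
        accl.reverse ++ (pvDsplit l).modifyHead (cur.reverse ++ ·) := by
  induction fuel with
  | zero => intro l cur accl h; omega
  | succ fuel ih =>
    intro l cur accl h
    cases l with
    | nil => simp [PySem.Chars.splitOn.go, pvDsplit]
    | cons c rest =>
      by_cases hc : c = '-'
      · subst hc
        have hgo : PySem.Chars.splitOn.go ['-'] (fuel + 1) ('-' :: rest) cur accl
            = PySem.Chars.splitOn.go ['-'] fuel rest [] (cur.reverse :: accl) := by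
          simp [PySem.Chars.splitOn.go, List.isPrefixOf]
        rw [hgo, ih rest [] (cur.reverse :: accl) (by simpa using Nat.lt_of_succ_lt_succ h)]
        cases hd : pvDsplit rest with
        | nil => exact absurd hd (pvDsplit_ne_nil rest)
        | cons q tl => simp [pvDsplit, hd]
      · have hgo : PySem.Chars.splitOn.go ['-'] (fuel + 1) (c :: rest) cur accl
            = PySem.Chars.splitOn.go ['-'] fuel rest (c :: cur) accl := by
          simp [PySem.Chars.splitOn.go, List.isPrefixOf, Ne.symm hc]
        rw [hgo, ih rest (c :: cur) accl (by simpa using Nat.lt_of_succ_lt_succ h)]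
        cases hd : pvDsplit rest with
        | nil => exact absurd hd (pvDsplit_ne_nil rest)
        | cons q tl => simp [pvDsplit, hd, hc]

theorem pvSplitOn_eq (s : List Char) : PySem.Chars.splitOn s ['-'] = pvDsplit s := by
  rw [PySem.Chars.splitOn, pvSplitOn_go_spec (s.length + 1) s [] [] (by omega)]
  cases hd : pvDsplit s with
  | nil => exact absurd hd (pvDsplit_ne_nil s)
  | cons q tl => simp

-- the common value of both scans
def pvTarget (name : List Char) : List Char :=
  if (pvDsplit name).take 2 = ["element".toList, "web".toList] ∧ 3 ≤ (pvDsplit name).length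
  then "element-web".toList else (pvDsplit name).headD []

theorem pvStartswith_iff_append (name p : List Char) :
    PySem.Chars.startswith name p = true ↔ ∃ rest, name = p ++ rest := by
  rw [PySem.Chars.startswith_iff]
  constructor
  · rintro ⟨t, ht⟩; exact ⟨t, ht.symm⟩
  · rintro ⟨t, ht⟩; exact ⟨t, ht.symm⟩

theorem pvEw_startswith_iff (name : List Char) :
    PySem.Chars.startswith name ("element-web-".toList) = true ↔
      ∃ t tl, pvDsplit name = "element".toList :: "web".toList :: t :: tl := by
  rw [pvStartswith_iff_append]
  constructor
  · rintro ⟨rest, hr⟩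
    have hname : name = "element".toList ++ '-' :: ("web".toList ++ '-' :: rest) := by
      rw [hr]; rfl
    rw [hname, pvDsplit_append _ _ (by decide), pvDsplit_append _ _ (by decide)]
    cases hd : pvDsplit rest with
    | nil => exact absurd hd (pvDsplit_ne_nil rest)
    | cons t tl => exact ⟨t, tl, rfl⟩
  · rintro ⟨t, tl, hd⟩
    refine ⟨PySem.Chars.join ['-'] (t :: tl), ?_⟩
    have hj := pvJoin_dsplit name
    rw [hd] at hj
    rw [← hj, PySem.Chars.join_cons_cons, PySem.Chars.join_cons_cons]
    rfl

theorem pvScanA_some (rs : List (List Char)) (name r : List Char)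
    (h : pvScanA rs name = some r) :
    r ∈ rs ∧ PySem.Chars.startswith name (r ++ ['-']) = true := by
  induction rs with
  | nil => simp [pvScanA] at h
  | cons r' rs ih =>
    simp only [pvScanA] at h
    split at h
    · injection h with h'
      subst h'
      rename_i hc
      exact ⟨List.mem_cons_self, hc⟩
    · obtain ⟨h1, h2⟩ := ih h
      exact ⟨List.mem_cons_of_mem _ h1, h2⟩

theorem pvRepos_cases : ∀ r ∈ pvRepos, r = "element-web".toList ∨ '-' ∉ r := by decide

theorem pvRepos_dsplit_short : ∀ r ∈ pvRepos, (pvDsplit r).length ≤ 2 := by decide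

theorem pvMulti_eq : pvMultiWordRepos = ["element-web".toList] := by decide

theorem pvEwDash : "element-web".toList ++ ['-'] = "element-web-".toList := by decide

theorem pvAMatch_eq_target (name : List Char) : pvAMatch name = pvTarget name := by
  unfold pvAMatch
  rw [pvMulti_eq, pvSplitOn_eq]
  by_cases hew : PySem.Chars.startswith name ("element-web-".toList) = true
  · have hs : pvScanA ["element-web".toList] name = some ("element-web".toList) := by
      simp only [pvScanA]
      rw [pvEwDash, if_pos hew]
    rw [hs]
    obtain ⟨t, tl, hd⟩ := (pvEw_startswith_iff name).mp hew
    unfold pvTarget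
    rw [hd, if_pos ⟨by simp, by simp⟩]
  · have hs : pvScanA ["element-web".toList] name = none := by
      simp only [pvScanA]
      rw [pvEwDash, if_neg hew]
    rw [hs]
    have htarget : pvTarget name = (pvDsplit name).headD [] := by
      unfold pvTarget
      rw [if_neg]
      rintro ⟨h2, h3⟩
      apply hew
      rw [pvEw_startswith_iff]
      cases hd : pvDsplit name with
      | nil => exact absurd hd (pvDsplit_ne_nil name)
      | cons a rest =>
        cases rest with
        | nil => rw [hd] at h3; simp at h3
        | cons b rest2 =>
          cases rest2 with
          | nil => rw [hd] at h3; simp at h3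
          | cons t tl =>
            rw [hd] at h2
            simp at h2
            refine ⟨t, tl, ?_⟩
            simp [h2.1, h2.2]
    rw [htarget]
    cases hsA : pvScanA pvRepos name with
    | none => rfl
    | some r =>
      obtain ⟨hmem, hstart⟩ := pvScanA_some pvRepos name r hsA
      rcases pvRepos_cases r hmem with hr | hr
      · subst hr
        rw [pvEwDash] at hstart
        exact absurd hstart hew
      · obtain ⟨rest, hre⟩ := (pvStartswith_iff_append name _).mp hstart
        have hname : name = r ++ '-' :: rest := by rw [hre]; simp
        rw [hname, pvDsplit_append _ _ hr]
        rfl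

theorem pvScanB_some (ts : List (List Char)) (is : List Int) (c : List Char)
    (h : pvScanB ts is = some c) :
    ∃ i ∈ is, PySem.Chars.join ['-'] (PySem.List.slice ts none (some i)) ∈ pvRepoSet ∧
      c = PySem.Chars.join ['-'] (PySem.List.slice ts none (some i)) := by
  induction is with
  | nil => simp [pvScanB] at h
  | cons i' is ih =>
    simp only [pvScanB] at h
    split at h
    · injection h with h'
      rename_i hc
      exact ⟨i', List.mem_cons_self, hc, h'.symm⟩
    · obtain ⟨i, h1, h2, h3⟩ := ih h
      exact ⟨i, List.mem_cons_of_mem _ h1, h2, h3⟩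

theorem pvScanB_append (ts : List (List Char)) (as bs : List Int) :
    pvScanB ts (as ++ bs) =
      match pvScanB ts as with
      | some c => some c
      | none => pvScanB ts bs := by
  induction as with
  | nil => simp [pvScanB]
  | cons i as ih =>
    simp only [List.cons_append, pvScanB]
    split
    · rfl
    · exact ih

theorem pvScanB_none (ts : List (List Char)) (is : List Int)
    (h : ∀ i ∈ is, PySem.Chars.join ['-'] (PySem.List.slice ts none (some i)) ∉ pvRepoSet) :
    pvScanB ts is = none := by
  induction is with
  | nil => rfl
  | cons i is ih =>
    simp only [pvScanB]
    rw [if_neg (h i List.mem_cons_self)]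
    exact ih fun j hj => h j (List.mem_cons_of_mem _ hj)

theorem pvCand_big (ts : List (List Char)) (hfree : ∀ t ∈ ts, '-' ∉ t) (i : Int)
    (h1 : 1 ≤ i) (h2 : i < (ts.length : Int))
    (hmem : PySem.Chars.join ['-'] (PySem.List.slice ts none (some i)) ∈ pvRepoSet) :
    PySem.Chars.join ['-'] (PySem.List.slice ts none (some i)) ∈ pvRepos ∧
      pvDsplit (PySem.Chars.join ['-'] (PySem.List.slice ts none (some i))) = ts.take i.toNat ∧
      i.toNat ≤ 2 := by
  have hsl : PySem.List.slice ts none (some i) = ts.take i.toNat :=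
    PySem.List.slice_to ts (by omega)
  have hlen : (ts.take i.toNat).length = i.toNat := by
    rw [List.length_take]
    omega
  have hne : ts.take i.toNat ≠ [] := by
    intro h0
    rw [h0] at hlen
    simp at hlen
    omega
  have hfree' : ∀ t ∈ ts.take i.toNat, '-' ∉ t := fun t ht => hfree t (List.take_subset _ _ ht)
  have hds : pvDsplit (PySem.Chars.join ['-'] (PySem.List.slice ts none (some i))) = ts.take i.toNat := by
    rw [hsl]
    exact pvDsplit_join _ hne hfree'
  have hr : PySem.Chars.join ['-'] (PySem.List.slice ts none (some i)) ∈ pvRepos :=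
    (PySem.Set.mem_ofList _ _).mp hmem
  have hshort := pvRepos_dsplit_short _ hr
  rw [hds, hlen] at hshort
  exact ⟨hr, hds, hshort⟩

theorem pvBMatch_eq_target (name : List Char) :
    (match pvScanB (pvDsplit name)
        (PySem.List.pyRange 1 ((pvDsplit name).length : Int) 1).reverse with
      | some c => c
      | none => (pvDsplit name).headD []) = pvTarget name := by
  have hfree := pvDsplit_dash_free name
  unfold pvTarget
  cases hts : pvDsplit name with
  | nil => exact absurd hts (pvDsplit_ne_nil name)
  | cons t0 rest =>
    rw [hts] at hfree
    cases rest with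
    | nil =>
      rw [show (([t0] : List (List Char)).length : Int) = 1 by simp]
      rw [PySem.List.pyRange_one_eq_nil (le_refl 1)]
      rw [if_neg (by rintro ⟨-, h3⟩; simp at h3)]
      rfl
    | cons t1 rest2 =>
      by_cases hcond : t0 = "element".toList ∧ t1 = "web".toList ∧ rest2 ≠ []
      · obtain ⟨he, hw, hr2⟩ := hcond
        cases rest2 with
        | nil => exact absurd rfl hr2
        | cons t2 rest3 =>
          have hn3 : (3 : Int) ≤ ((t0 :: t1 :: t2 :: rest3).length : Int) := by
            simp only [List.length_cons]
            push_cast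
            omega
          rw [PySem.List.pyRange_one_append 1 3 _ (by omega) hn3, List.reverse_append,
            pvScanB_append]
          have hhigh : pvScanB (t0 :: t1 :: t2 :: rest3)
              (PySem.List.pyRange 3 ((t0 :: t1 :: t2 :: rest3).length : Int) 1).reverse = none := by
            apply pvScanB_none
            intro i hi hmem
            rw [List.mem_reverse, PySem.List.mem_pyRange_one] at hi
            have := (pvCand_big _ hfree i (by omega) hi.2 hmem).2.2
            omega
          rw [hhigh]
          have h13 : (PySem.List.pyRange 1 3 1).reverse = [2, 1] := by decide
          rw [h13]
          have hsl2 : PySem.List.slice (t0 :: t1 :: t2 :: rest3) none (some (2 : Int)) = [t0, t1] := by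
            rw [PySem.List.slice_to _ (by omega)]
            rfl
          simp only [pvScanB]
          rw [hsl2]
          rw [show PySem.Chars.join ['-'] [t0, t1] = "element-web".toList by rw [he, hw]; decide]
          rw [if_pos (by decide : "element-web".toList ∈ pvRepoSet)]
          rw [if_pos ⟨by simp [he, hw], by simp⟩]
      · have htneg : ¬ (((t0 :: t1 :: rest2).take 2 = ["element".toList, "web".toList]) ∧
            3 ≤ (t0 :: t1 :: rest2).length) := by
          rintro ⟨hA, hB⟩
          simp only [List.take_succ_cons, List.take_zero, List.cons.injEq, and_true] at hA
          apply hcond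
          refine ⟨hA.1, hA.2, ?_⟩
          cases rest2 with
          | nil => simp at hB
          | cons _ _ => simp
        rw [if_neg htneg]
        cases hsc : pvScanB (t0 :: t1 :: rest2)
            (PySem.List.pyRange 1 ((t0 :: t1 :: rest2).length : Int) 1).reverse with
        | none => rfl
        | some c =>
          obtain ⟨i, hi, hmemset, hc⟩ := pvScanB_some _ _ _ hsc
          rw [List.mem_reverse, PySem.List.mem_pyRange_one] at hi
          obtain ⟨hrm, hds, hk2⟩ := pvCand_big _ hfree i hi.1 hi.2 hmemset
          rcases (by omega : i.toNat = 1 ∨ i.toNat = 2) with hk | hk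
          · have hsl1 : PySem.List.slice (t0 :: t1 :: rest2) none (some i) = [t0] := by
              rw [PySem.List.slice_to _ (by omega), hk]
              rfl
            rw [hsl1, PySem.Chars.join_singleton] at hc
            simp [hc]
          · have hsl2 : PySem.List.slice (t0 :: t1 :: rest2) none (some i) = [t0, t1] := by
              rw [PySem.List.slice_to _ (by omega), hk]
              rfl
            exfalso
            rw [hsl2] at hrm hds
            rw [hk] at hds
            rcases pvRepos_cases _ hrm with hEq | hNd
            · rw [hEq] at hds
              rw [show pvDsplit ("element-web".toList) = ["element".toList, "web".toList] by decide] at hds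
              rw [show (t0 :: t1 :: rest2).take 2 = [t0, t1] from rfl] at hds
              simp only [List.cons.injEq, and_true] at hds
              apply hcond
              refine ⟨hds.1.symm, hds.2.symm, ?_⟩
              cases rest2 with
              | nil => simp at hi; omega
              | cons _ _ => simp
            · apply hNd
              rw [PySem.Chars.join_cons_cons]
              simp

theorem pvStrip_eq (ps : List (List Char)) (name : List Char) :
    pvStripB ps name = pvStripA ps name := by
  induction ps with
  | nil => rfl
  | cons p ps ih =>
    simp only [pvStripA, pvStripB]
    split
    · rfl
    · exact ih

theorem pvCore_eq (l : List Char) : pvACore l = pvBCore l := by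
  simp only [pvACore, pvBCore]
  rw [pvStrip_eq, pvAMatch_eq_target, pvSplitOn_eq]
  exact (pvBMatch_eq_target _).symm

-- ===== VERDICT (by name: the statement is the Claim_ definition above) =====
theorem get_repo_from_folder_spec : Claim_equal_get_repo_from_folder := by
  intro folder _
  unfold Spec_get_repo_from_folder get_repo_from_folder get_repo_from_folder_alt
  rw [pvCore_eq]
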